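-- pv_equiv track=rewrite | github.com/sangbumlikeagod/SSAFY | 0809/delete_overlap.py | search
-- ===== SOURCE A (Python) =====
-- def search(lst_num):
--     while lst_num:
--         size = len(lst_num)
--         i = 0
--         while i < size - 1:
--
--             if lst_num[i] == lst_num[i + 1]:
--                 lst_num.pop(i + 1)
--                 lst_num.pop(i)
--                 break
--             i += 1
--
--         else:
--             if size == len(lst_num):
--                 return len(lst_num)
--             else:
--                 continue
--
--     return 0
-- ===== SOURCE B (Python) =====
-- def search(lst_num):
--     stack = []
--     for x in lst_num:
--         if stack and stack[-1] == x:
--             stack.pop()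
--         else:
--             stack.append(x)
--     return len(stack)
-- ===== Notes on version B (the rewrite author's own statement) =====
-- stated objective: faster
-- what changed: one left-to-right stack pass (pop when the top equals the current element, else push) replaces A's repeated full rescans that delete the first adjacent equal pair and restart
import Mathlib
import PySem

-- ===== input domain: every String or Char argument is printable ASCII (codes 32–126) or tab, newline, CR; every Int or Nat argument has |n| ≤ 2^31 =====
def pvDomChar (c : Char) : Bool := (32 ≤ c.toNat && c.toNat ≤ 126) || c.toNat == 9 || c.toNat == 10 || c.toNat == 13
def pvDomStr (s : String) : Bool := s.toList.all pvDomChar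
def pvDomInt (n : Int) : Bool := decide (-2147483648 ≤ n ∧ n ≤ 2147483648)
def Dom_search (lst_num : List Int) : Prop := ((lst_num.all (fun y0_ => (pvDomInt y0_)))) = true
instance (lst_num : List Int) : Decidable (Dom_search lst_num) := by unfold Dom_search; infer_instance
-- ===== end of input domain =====

-- B removes each adjacent equal pair in one stack pass instead of A's restart-after-each-deletion
-- rescans; equivalence is about the RETURN value only (the Python A empties/mutates its argument list).

-- ===== PORT A =====
-- inner `while i < size - 1` loop of A: returns the list with the FIRST adjacent equal pair
-- (indices i, i+1) removed by the two pops, or none if the loop runs to completion without break.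
def innerScan (l : List Int) (i : Nat) : Option (List Int) :=
  if _h : i < l.length - 1 then
    if l[i]? = l[i+1]? then
      some ((l.eraseIdx (i+1)).eraseIdx i)
    else innerScan l (i+1)
  else none
termination_by l.length - i

-- one-step unfolding of innerScan (cited by the proofs and by search's termination argument)
theorem innerScan_unfold (l : List Int) (i : Nat) :
    innerScan l i =
      if _h : i < l.length - 1 then
        if l[i]? = l[i+1]? then
          some ((l.eraseIdx (i+1)).eraseIdx i)
        else innerScan l (i+1)
      else none := by
  rw [innerScan]

-- termination helper for `search` (cited in its decreasing_by)
theorem innerScan_some_length : ∀ (k : Nat) (l : List Int) (i : Nat) (l' : List Int),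
    l.length - i ≤ k → innerScan l i = some l' → l'.length + 2 = l.length := by
  intro k
  induction k with
  | zero =>
    intro l i l' hk h
    rw [innerScan_unfold] at h
    rw [dif_neg (by omega)] at h
    cases h
  | succ n ih =>
    intro l i l' hk h
    rw [innerScan_unfold] at h
    by_cases hlt : i < l.length - 1
    · rw [dif_pos hlt] at h
      by_cases he : l[i]? = l[i+1]?
      · rw [if_pos he] at h
        cases h
        have hi1 : i + 1 < l.length := by omega
        have e1 : (l.eraseIdx (i+1)).length = l.length - 1 := by
          simp [List.length_eraseIdx, hi1]
        have e2 : ((l.eraseIdx (i+1)).eraseIdx i).length = (l.eraseIdx (i+1)).length - 1 := by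
          rw [List.length_eraseIdx]
          rw [if_pos (show i < (l.eraseIdx (i+1)).length by omega)]
        omega
      · rw [if_neg he] at h
        exact ih l (i+1) l' (by omega) h
    · rw [dif_neg hlt] at h
      cases h

def search (lst_num : List Int) : Int :=
  if lst_num = [] then 0
  else
    match h : innerScan lst_num 0 with
    | some l' => search l'
    | none =>
      -- inner loop completed without break, so `size == len(lst_num)` holds: return len(lst_num)
      (lst_num.length : Int)
termination_by lst_num.length
decreasing_by
  have := innerScan_some_length lst_num.length lst_num 0 l' (by omega) h
  omega

-- ===== PORT B =====
-- one step of Source B's loop body; the stack is kept top-at-head (only its length is returned)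
def step (st : List Int) (x : Int) : List Int :=
  match st with
  | [] => [x]
  | t :: r => if t = x then r else x :: t :: r

def search_alt (lst_num : List Int) : Int :=
  ((lst_num.foldl step []).length : Int)

-- ===== PRECONDITION & SPEC =====
def Spec_search (lst_num : List Int) (out : Int) : Prop := out = search_alt lst_num
instance (lst_num : List Int) (out : Int) : Decidable (Spec_search lst_num out) := by unfold Spec_search; infer_instance

-- ===== CLAIM (what is proved, stated in full; the proofs are below) =====
def Claim_equal_search : Prop := ∀ (lst_num : List Int), Dom_search lst_num → Spec_search lst_num (search lst_num)

-- ===== LEMMAS AND PROOFS =====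

theorem step_chain (st : List Int) (x : Int) (h : List.IsChain (· ≠ ·) st) :
    List.IsChain (· ≠ ·) (step st x) := by
  cases st with
  | nil => exact List.isChain_singleton x
  | cons t r =>
    by_cases hx : t = x
    · simpa [step, hx] using h.tail
    · rw [step]
      simp only [if_neg hx, List.isChain_cons_cons]
      exact ⟨Ne.symm hx, h⟩

theorem step_step (st : List Int) (a : Int) (h : List.IsChain (· ≠ ·) st) :
    step (step st a) a = st := by
  cases st with
  | nil => simp [step]
  | cons t r =>
    by_cases ht : t = a
    · subst ht
      cases r with
      | nil => simp [step]
      | cons u r' =>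
        have htu : t ≠ u := (List.isChain_cons_cons.mp h).1
        simp [step, Ne.symm, htu]
    · simp [step, ht]

theorem innerScan_shift (x : Int) : ∀ (k : Nat) (l : List Int) (i : Nat),
    l.length - i ≤ k → innerScan (x :: l) (i+1) = Option.map (x :: ·) (innerScan l i) := by
  intro k
  induction k with
  | zero =>
    intro l i hk
    rw [innerScan_unfold (x :: l), innerScan_unfold l]
    rw [dif_neg (by simp; omega), dif_neg (by omega)]
    rfl
  | succ n ih =>
    intro l i hk
    rw [innerScan_unfold (x :: l), innerScan_unfold l]
    by_cases hlt : i < l.length - 1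
    · have h1 : i + 1 < (x :: l).length - 1 := by simp; omega
      rw [dif_pos h1, dif_pos hlt]
      have hg1 : (x :: l)[i+1]? = l[i]? := by simp
      have hg2 : (x :: l)[i+1+1]? = l[i+1]? := by simp
      rw [hg1, hg2]
      by_cases he : l[i]? = l[i+1]?
      · rw [if_pos he, if_pos he]
        simp [List.eraseIdx_cons_succ]
      · rw [if_neg he, if_neg he]
        exact ih l (i+1) (by omega)
    · rw [dif_neg (by simp; omega), dif_neg hlt]
      rfl

theorem innerScan_nil : innerScan ([] : List Int) 0 = none := by
  rw [innerScan_unfold]; simp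

theorem innerScan_single (a : Int) : innerScan [a] 0 = none := by
  rw [innerScan_unfold]; simp

theorem innerScan_cons2 (a b : Int) (rest : List Int) :
    innerScan (a :: b :: rest) 0 =
      if a = b then some rest else Option.map (a :: ·) (innerScan (b :: rest) 0) := by
  rw [innerScan_unfold]
  have hg : (0 : Nat) < (a :: b :: rest).length - 1 := by simp
  rw [dif_pos hg]
  have h0 : (a :: b :: rest)[0]? = some a := rfl
  have h1 : (a :: b :: rest)[0+1]? = some b := rfl
  rw [h0, h1]
  by_cases hab : a = b
  · simp [hab, List.eraseIdx]
  · rw [if_neg (by simp [hab]), if_neg hab]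
    exact innerScan_shift a ((b :: rest).length) (b :: rest) 0 (by omega)

theorem inner_none_chain : ∀ (l : List Int), innerScan l 0 = none → List.IsChain (· ≠ ·) l := by
  intro l
  induction l with
  | nil => intro _; exact List.isChain_nil
  | cons a tl ih =>
    cases tl with
    | nil => intro _; exact List.isChain_singleton a
    | cons b rest =>
      intro h
      rw [innerScan_cons2] at h
      by_cases hab : a = b
      · rw [if_pos hab] at h; cases h
      · rw [if_neg hab, Option.map_eq_none_iff] at h
        exact List.isChain_cons_cons.mpr ⟨hab, ih h⟩

theorem inner_some_foldl : ∀ (l l' : List Int), innerScan l 0 = some l' →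
    ∀ (st : List Int), List.IsChain (· ≠ ·) st →
      List.foldl step st l' = List.foldl step st l := by
  intro l
  induction l with
  | nil => intro l' h; rw [innerScan_nil] at h; cases h
  | cons a tl ih =>
    cases tl with
    | nil => intro l' h; rw [innerScan_single] at h; cases h
    | cons b rest =>
      intro l' h st hst
      rw [innerScan_cons2] at h
      by_cases hab : a = b
      · rw [if_pos hab] at h
        cases h
        subst hab
        simp only [List.foldl_cons]
        rw [step_step st a hst]
      · rw [if_neg hab, Option.map_eq_some_iff] at h
        obtain ⟨m, hm, rfl⟩ := h
        simp only [List.foldl_cons]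
        exact ih m hm (step st a) (step_chain st a hst)

theorem chain_foldl : ∀ (l st : List Int), List.IsChain (· ≠ ·) (st.reverse ++ l) →
    List.foldl step st l = l.reverse ++ st := by
  intro l
  induction l with
  | nil => intro st _; simp
  | cons a tl ih =>
    intro st h
    have hstep : step st a = a :: st := by
      cases st with
      | nil => simp [step]
      | cons t r =>
        have hta : t ≠ a := by
          have h' := (List.isChain_append.mp h).2.2
          exact h' t (by simp) a (by simp)
        simp [step, hta]
    rw [List.foldl_cons, hstep]
    have h' : List.IsChain (· ≠ ·) ((a :: st).reverse ++ tl) := by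
      simpa [List.append_assoc] using h
    rw [ih (a :: st) h']
    simp

theorem search_eq_alt : ∀ (n : Nat) (l : List Int), l.length ≤ n → search l = search_alt l := by
  intro n
  induction n with
  | zero =>
    intro l hl
    have : l = [] := List.eq_nil_of_length_eq_zero (by omega)
    subst this
    rw [search]
    simp [search_alt]
  | succ n ih =>
    intro l hl
    by_cases hnil : l = []
    · subst hnil; rw [search]; simp [search_alt]
    · rw [search]
      simp only [if_neg hnil]
      split
      case h_1 l' heq =>
        have hlen := innerScan_some_length l.length l 0 l' (by omega) heq
        have h1 : search l' = search_alt l' := ih l' (by omega)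
        have h2 : List.foldl step [] l' = List.foldl step [] l :=
          inner_some_foldl l l' heq [] List.isChain_nil
        rw [h1]
        simp [search_alt, h2]
      case h_2 heq =>
        have hch : List.IsChain (· ≠ ·) l := inner_none_chain l heq
        have := chain_foldl l [] (by simpa using hch)
        simp [search_alt, this]

-- ===== VERDICT (by name: the statement is the Claim_ definition above) =====
theorem search_spec : Claim_equal_search := by
  intro l _
  unfold Spec_search
  exact search_eq_alt l.length l (le_refl _)
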